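-- pv_equiv track=rewrite | github.com/wulukewu/file-lister-2025 | app.py | get_group_statuses
-- ===== SOURCE A (Python) =====
-- def get_group_statuses(file_list):
--     """Calculates and returns group statuses based on the file list."""
--     duplicate_groups = {}
--     for file_data in file_list:
--         group_number = file_data.get('Duplicate Group')
--         if group_number:
--             if group_number not in duplicate_groups:
--                 duplicate_groups[group_number] = []
--             duplicate_groups[group_number].append(file_data)
--
--     group_statuses = {}
--     for group_number, files in duplicate_groups.items():
--         num_not_deleted = sum(1 for file_data in files if file_data["Delete"].lower() != "yes")
--
--         if len(files) == 1:  # If only one file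
--             group_statuses[group_number] = "Only 1 file"  # Report as only 1 file
--         elif num_not_deleted == 0:  # If there are multiple files, and ALL is on delete
--             group_statuses[group_number] = "All to be Deleted"  # Mark group to delete everything
--         elif num_not_deleted == 1:
--             group_statuses[group_number] = "Only 1 file"
--         else:
--             group_statuses[group_number] = "Multiple Duplicates"  # Mark as having multiple duplicates
--
--     return group_statuses
-- ===== SOURCE B (Python) =====
-- def get_group_statuses(file_list):
--     """Calculates and returns group statuses based on the file list."""
--     # One pass: per group keep only (total, not_deleted) counters, never lists of files.
--     counts = {}
--     for file_data in file_list: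
--         group_number = file_data.get('Duplicate Group')
--         if group_number:
--             total, not_deleted = counts.get(group_number, (0, 0))
--             if file_data['Delete'].lower() != 'yes':
--                 not_deleted += 1
--             counts[group_number] = (total + 1, not_deleted)
--     return {
--         group_number: ("Only 1 file" if total == 1 or not_deleted == 1
--                        else "All to be Deleted" if not_deleted == 0
--                        else "Multiple Duplicates")
--         for group_number, (total, not_deleted) in counts.items()
--     }
-- ===== Notes on version B (the rewrite author's own statement) =====
-- stated objective: simpler
-- what changed: Instead of grouping the file dicts into per-group lists and then rescanning each list with a sum(), B keeps only a (total, not_deleted) counter pair per group in one pass and emits each label directly from the pair via a dict comprehension with a merged cascade (total==1 or not_deleted==1 -> 'Only 1 file').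
import Mathlib
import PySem

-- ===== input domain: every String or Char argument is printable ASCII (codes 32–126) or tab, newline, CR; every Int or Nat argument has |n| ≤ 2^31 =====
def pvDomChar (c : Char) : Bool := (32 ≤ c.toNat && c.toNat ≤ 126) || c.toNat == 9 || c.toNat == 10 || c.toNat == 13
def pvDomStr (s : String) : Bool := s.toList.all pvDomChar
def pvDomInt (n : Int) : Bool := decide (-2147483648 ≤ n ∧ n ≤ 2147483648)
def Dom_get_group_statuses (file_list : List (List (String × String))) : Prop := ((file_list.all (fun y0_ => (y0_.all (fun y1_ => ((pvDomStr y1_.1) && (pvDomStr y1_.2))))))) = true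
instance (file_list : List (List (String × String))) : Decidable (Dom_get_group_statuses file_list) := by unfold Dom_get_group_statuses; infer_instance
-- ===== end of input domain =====

-- B replaces A's per-group file lists (built, then rescanned with a sum) by a single pass that
-- keeps only (total, not_deleted) counters per group and emits each label straight from the pair.
-- Pre_ excludes exactly the inputs where Python raises KeyError (a file in a truthy duplicate
-- group without a 'Delete' key); both A and B raise there.

-- ===== PORT A =====
-- file dicts are association lists; fd.get(k) = first match (Python dict semantics)
def pvGet (fd : List (String × String)) (k : String) : Option String :=
  (PySem.Dict.mk fd).get? k

-- one iteration of A's first loop (group the file dicts into per-group lists)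
def pvStepA (d : PySem.Dict String (List (List (String × String))))
    (file_data : List (String × String)) : PySem.Dict String (List (List (String × String))) :=
  match pvGet file_data "Duplicate Group" with
  | some group_number =>
    if group_number ≠ "" then
      let d' := if d.contains group_number then d else d.insert group_number []
      d'.insert group_number (d'.getD group_number [] ++ [file_data])
    else d
  | none => d

-- body of A's second loop: num_not_deleted = sum(...), then the if/elif cascade
-- (fd["Delete"] ported as getD "Delete" ""; exact under Pre_, where the key is present)
def pvLabelA (files : List (List (String × String))) : String :=
  let num_not_deleted : Int :=
    (files.map (fun file_data =>
      if PySem.Str.lower ((PySem.Dict.mk file_data).getD "Delete" "") ≠ "yes" then (1 : Int) else 0)).sum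
  if files.length = 1 then "Only 1 file"
  else if num_not_deleted = 0 then "All to be Deleted"
  else if num_not_deleted = 1 then "Only 1 file"
  else "Multiple Duplicates"

def get_group_statuses (file_list : List (List (String × String))) : List (String × String) :=
  let duplicate_groups := file_list.foldl pvStepA PySem.Dict.empty
  let group_statuses :=
    duplicate_groups.items.foldl (fun gs p => gs.insert p.1 (pvLabelA p.2)) PySem.Dict.empty
  group_statuses.items

-- ===== PORT B =====
-- one iteration of B's single counting pass: (total, not_deleted) per group
def pvStepB (d : PySem.Dict String (Int × Int))
    (file_data : List (String × String)) : PySem.Dict String (Int × Int) :=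
  match pvGet file_data "Duplicate Group" with
  | some group_number =>
    if group_number ≠ "" then
      let p := d.getD group_number (0, 0)
      let not_deleted :=
        if PySem.Str.lower ((PySem.Dict.mk file_data).getD "Delete" "") ≠ "yes" then p.2 + 1 else p.2
      d.insert group_number (p.1 + 1, not_deleted)
    else d
  | none => d

def get_group_statuses_alt (file_list : List (List (String × String))) : List (String × String) :=
  let counts := file_list.foldl pvStepB PySem.Dict.empty
  -- the dict comprehension: counts' keys are already distinct, so its items are exactly this map
  counts.items.map (fun q =>
    (q.1, if q.2.1 = 1 ∨ q.2.2 = 1 then "Only 1 file"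
          else if q.2.2 = 0 then "All to be Deleted"
          else "Multiple Duplicates"))

-- ===== PRECONDITION & SPEC =====
-- Pre_ excludes exactly the inputs on which Python A raises KeyError (and Python B raises the
-- same KeyError): a file whose 'Duplicate Group' value is truthy but which has no 'Delete' key.
def Pre_get_group_statuses (file_list : List (List (String × String))) : Prop :=
  ∀ fd ∈ file_list, (PySem.Dict.mk fd).getD "Duplicate Group" "" ≠ "" →
    (PySem.Dict.mk fd).contains "Delete" = true
instance (file_list : List (List (String × String))) : Decidable (Pre_get_group_statuses file_list) := by
  unfold Pre_get_group_statuses; infer_instance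

def pvWitness_get_group_statuses : (List (List (String × String))) :=
  [[("Duplicate Group", "1"), ("Delete", "yes")],
   [("Duplicate Group", "1"), ("Delete", "no")],
   [("Duplicate Group", ""), ("Name", "x")]]

def Spec_get_group_statuses (file_list : List (List (String × String))) (out : List (String × String)) : Prop := out = get_group_statuses_alt file_list
instance (file_list : List (List (String × String))) (out : List (String × String)) : Decidable (Spec_get_group_statuses file_list out) := by unfold Spec_get_group_statuses; infer_instance

-- ===== CLAIM (what is proved, stated in full; the proofs are below) =====
def Claim_equal_get_group_statuses : Prop := ∀ (file_list : List (List (String × String))), Dom_get_group_statuses file_list → Pre_get_group_statuses file_list → Spec_get_group_statuses file_list (get_group_statuses file_list)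

-- ===== LEMMAS AND PROOFS =====

-- the abstraction B maintains per group: pvH files = (len(files), num_not_deleted files)
def pvH (fs : List (List (String × String))) : Int × Int :=
  ((fs.length : Int),
   (fs.map (fun file_data =>
     if PySem.Str.lower ((PySem.Dict.mk file_data).getD "Delete" "") ≠ "yes" then (1 : Int) else 0)).sum)

lemma pvH_append (old : List (List (String × String))) (fd : List (String × String)) :
    pvH (old ++ [fd])
      = ((pvH old).1 + 1,
         if PySem.Str.lower ((PySem.Dict.mk fd).getD "Delete" "") ≠ "yes"
         then (pvH old).2 + 1 else (pvH old).2) := by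
  by_cases hd : PySem.Str.lower ((PySem.Dict.mk fd).getD "Delete" "") ≠ "yes" <;>
    simp [pvH, List.sum_append, hd]

lemma pv_get?_map (l : List (String × List (List (String × String)))) (g : String) :
    (PySem.Dict.mk (l.map (fun p => (p.1, pvH p.2)))).get? g
      = ((PySem.Dict.mk l).get? g).map pvH := by
  induction l with
  | nil => rfl
  | cons p t ih =>
    rw [List.map_cons, PySem.Dict.get?_mk_cons, PySem.Dict.get?_mk_cons]
    by_cases h : p.1 == g
    · simp [h]
    · simp [h, ih]

lemma pv_insert_map (dA : PySem.Dict String (List (List (String × String))))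
    (dB : PySem.Dict String (Int × Int))
    (hR : dB.items = dA.items.map (fun p => (p.1, pvH p.2))) (g : String)
    (v : List (List (String × String))) :
    (dB.insert g (pvH v)).items = ((dA.insert g v).items).map (fun p => (p.1, pvH p.2)) := by
  have hc : dB.contains g = dA.contains g := by
    rw [PySem.Dict.contains_eq_isSome_get?, PySem.Dict.contains_eq_isSome_get?]
    have : dB.get? g = (dA.get? g).map pvH := by
      have := pv_get?_map dA.items g
      rwa [← hR] at this
    rw [this]; cases dA.get? g <;> rfl
  rw [PySem.Dict.items_insert, PySem.Dict.items_insert, hc]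
  by_cases h : dA.contains g
  · simp only [h, if_true, hR, List.map_map]
    apply List.map_congr_left
    intro p _
    by_cases hp : p.1 == g
    · have : p.1 = g := by simpa using hp
      simp [Function.comp, this]
    · simp [Function.comp, hp]
  · simp [h, hR]

lemma pv_get_rel (dA : PySem.Dict String (List (List (String × String))))
    (dB : PySem.Dict String (Int × Int))
    (hR : dB.items = dA.items.map (fun p => (p.1, pvH p.2))) (g : String) :
    dB.getD g (0, 0) = pvH (dA.getD g []) := by
  have hg : dB.get? g = (dA.get? g).map pvH := by
    have := pv_get?_map dA.items g
    rwa [← hR] at this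
  rw [PySem.Dict.getD_eq_get?_getD, PySem.Dict.getD_eq_get?_getD, hg]
  cases dA.get? g <;> rfl

-- A's grouping step in normal form: always d.insert g (d.getD g [] ++ [fd])
lemma pvStepA_eq (d : PySem.Dict String (List (List (String × String))))
    (fd : List (String × String)) :
    pvStepA d fd = match pvGet fd "Duplicate Group" with
      | some g => if g ≠ "" then d.insert g (d.getD g [] ++ [fd]) else d
      | none => d := by
  unfold pvStepA
  cases pvGet fd "Duplicate Group" with
  | none => rfl
  | some g =>
    dsimp only
    by_cases hg : g ≠ ""
    · rw [if_pos hg, if_pos hg]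
      by_cases hc : d.contains g
      · simp [hc]
      · simp only [hc, Bool.false_eq_true, if_false]
        rw [PySem.Dict.getD_insert_self, PySem.Dict.insert_insert_self,
          PySem.Dict.getD_of_not_contains _ _ (by simpa using hc)]
    · simp [hg]

lemma pv_step_rel (dA : PySem.Dict String (List (List (String × String))))
    (dB : PySem.Dict String (Int × Int))
    (hR : dB.items = dA.items.map (fun p => (p.1, pvH p.2)))
    (fd : List (String × String)) :
    (pvStepB dB fd).items = (pvStepA dA fd).items.map (fun p => (p.1, pvH p.2)) := by
  rw [pvStepA_eq]
  unfold pvStepB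
  cases pvGet fd "Duplicate Group" with
  | none => exact hR
  | some g =>
    dsimp only
    by_cases hg : g ≠ ""
    · rw [if_pos hg, if_pos hg]
      have hget := pv_get_rel dA dB hR g
      have hval : (let p := dB.getD g (0, 0);
          let nd := if PySem.Str.lower ((PySem.Dict.mk fd).getD "Delete" "") ≠ "yes" then p.2 + 1 else p.2;
          ((p.1 + 1, nd) : Int × Int)) = pvH (dA.getD g [] ++ [fd]) := by
        rw [hget]
        exact (pvH_append (dA.getD g []) fd).symm
      rw [hval]
      exact pv_insert_map dA dB hR g _
    · rw [if_neg hg, if_neg hg]; exact hR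

lemma pv_loop_rel (l : List (List (String × String))) :
    ∀ (dA : PySem.Dict String (List (List (String × String))))
      (dB : PySem.Dict String (Int × Int)),
      dB.items = dA.items.map (fun p => (p.1, pvH p.2)) →
      (l.foldl pvStepB dB).items = (l.foldl pvStepA dA).items.map (fun p => (p.1, pvH p.2)) := by
  induction l with
  | nil => intro dA dB hR; simpa using hR
  | cons fd t ih =>
    intro dA dB hR
    simp only [List.foldl_cons]
    exact ih _ _ (pv_step_rel dA dB hR fd)

lemma pv_nodup_loop (l : List (List (String × String))) :
    ∀ (dA : PySem.Dict String (List (List (String × String)))),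
      dA.keys.Nodup → (l.foldl pvStepA dA).keys.Nodup := by
  induction l with
  | nil => intro dA h; simpa using h
  | cons fd t ih =>
    intro dA h
    simp only [List.foldl_cons]
    apply ih
    rw [pvStepA_eq]
    cases pvGet fd "Duplicate Group" with
    | none => exact h
    | some g =>
      dsimp only
      by_cases hg : g ≠ ""
      · rw [if_pos hg]; exact PySem.Dict.nodup_keys_insert _ _ _ h
      · rw [if_neg hg]; exact h

-- the labels agree: A's cascade on the file list equals B's cascade on the counter pair
lemma pv_label_eq (fs : List (List (String × String))) :
    pvLabelA fs = (if (pvH fs).1 = 1 ∨ (pvH fs).2 = 1 then "Only 1 file"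
      else if (pvH fs).2 = 0 then "All to be Deleted"
      else "Multiple Duplicates") := by
  unfold pvLabelA pvH
  set n : Int := (fs.map (fun file_data =>
    if PySem.Str.lower ((PySem.Dict.mk file_data).getD "Delete" "") ≠ "yes" then (1 : Int) else 0)).sum
  simp only
  by_cases h1 : fs.length = 1
  · simp [h1]
  · by_cases h0 : n = 0
    · simp [h1, h0]
    · by_cases hn1 : n = 1
      · simp [h1, hn1]
      · simp [h1, h0, hn1]

-- ===== VERDICT (by name: the statement is the Claim_ definition above) =====
theorem get_group_statuses_spec : Claim_equal_get_group_statuses := by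
  intro file_list _ _
  unfold Spec_get_group_statuses get_group_statuses get_group_statuses_alt
  simp only
  have hR : (file_list.foldl pvStepB PySem.Dict.empty).items
      = (file_list.foldl pvStepA PySem.Dict.empty).items.map (fun p => (p.1, pvH p.2)) :=
    pv_loop_rel file_list PySem.Dict.empty PySem.Dict.empty rfl
  set dA := file_list.foldl pvStepA PySem.Dict.empty with hdA
  have hnd : dA.keys.Nodup := pv_nodup_loop file_list PySem.Dict.empty (by simp)
  have hfresh : ∀ p ∈ dA.items, (PySem.Dict.empty : PySem.Dict String String).contains p.1 = false := by
    intro p _; simp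
  have hA : (dA.items.foldl (fun gs p => gs.insert p.1 (pvLabelA p.2))
      (PySem.Dict.empty : PySem.Dict String String)).items
      = dA.items.map (fun p => (p.1, pvLabelA p.2)) := by
    have := PySem.Dict.items_foldl_insert_fresh (l := dA.items) (d := (PySem.Dict.empty : PySem.Dict String String))
      (k := fun p => p.1) (v := fun p => pvLabelA p.2) hfresh (by simpa [PySem.Dict.keys] using hnd)
    simpa using this
  rw [hA, hR, List.map_map]
  apply List.map_congr_left
  intro p _
  simp [Function.comp, pv_label_eq p.2]
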